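-- pv_equiv track=rewrite | github.com/owenjchen/acsl_python | sumaddle_puzzle_v2.py | check_prefix_constraint
-- ===== SOURCE A (Python) =====
-- def check_prefix_constraint(n,row, prefix):
--     """
--     Check if current row has a duplicate value in prefix
--     """
--     for i in range(n):
--         exclude_numbers =  [r[i] for r in prefix]
--         if row[i] > 0:
--             if row[i] in exclude_numbers:
--                 return False
--         else:
--             if exclude_numbers.count(0) == 2:
--                 return False
--     return True
-- ===== SOURCE B (Python) =====
-- def check_prefix_constraint(n, row, prefix):
--     """
--     Check if current row has a duplicate value in prefix.
--
--     Row-major strategy: one fused sweep over the prefix rows that bails out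
--     as soon as a positive entry of row is seen in its column, while counting
--     column zeros on the fly; a final declarative pass rejects non-positive
--     columns that already hold two zeros.
--     """
--     zeros = [0] * n
--     for r in prefix:
--         for i in range(n):
--             zeros[i] += (r[i] == 0)
--             if row[i] > 0 and r[i] == row[i]:
--                 return False
--     return not any(row[i] <= 0 and zeros[i] == 2 for i in range(n))
-- ===== Notes on version B (the rewrite author's own statement) =====
-- stated objective: alternative
-- what changed: A loops column-by-column, rebuilding each column list from prefix and rescanning it with 'in'/.count; B traverses row-major in one fused sweep over the prefix rows, returning False at the first positive duplicate while accumulating per-column zero counts, then rejects non-positive columns with two zeros in a final declarative any().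
-- outside the precondition, e.g. on check_prefix_constraint(2, [0, 1], [[0], [0]]): A returns False, B raises IndexError
import Mathlib
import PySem

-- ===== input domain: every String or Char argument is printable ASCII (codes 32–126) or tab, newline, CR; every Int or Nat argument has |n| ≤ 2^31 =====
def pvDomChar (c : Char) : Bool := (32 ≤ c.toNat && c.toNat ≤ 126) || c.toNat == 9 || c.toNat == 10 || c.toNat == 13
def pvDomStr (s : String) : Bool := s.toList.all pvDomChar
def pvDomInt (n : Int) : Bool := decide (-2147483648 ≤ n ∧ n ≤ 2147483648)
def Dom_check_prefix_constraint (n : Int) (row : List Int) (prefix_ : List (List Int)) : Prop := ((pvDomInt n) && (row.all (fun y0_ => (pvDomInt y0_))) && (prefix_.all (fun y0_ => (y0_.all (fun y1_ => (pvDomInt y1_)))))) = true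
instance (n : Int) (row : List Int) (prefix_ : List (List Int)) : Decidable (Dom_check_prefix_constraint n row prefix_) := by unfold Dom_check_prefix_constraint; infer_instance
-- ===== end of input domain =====

-- B replaces A's column-by-column list rebuild and rescan by one row-major fused sweep
-- over the prefix rows (early exit on a positive duplicate, zero counts kept on the fly)
-- followed by a final declarative check (objective: alternative).

-- ===== PORT A =====
-- the body of A's 'for i in range(n)' loop, as structural recursion over the index list
def cpcGoA (row : List Int) (prefix_ : List (List Int)) : List Int → Bool
  | [] => true
  | i :: rest =>
    let excl := prefix_.map (fun r => PySem.List.pyGetD r i 0)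
    let v := PySem.List.pyGetD row i 0
    if v > 0 then
      if excl.contains v then false else cpcGoA row prefix_ rest
    else
      if PySem.List.count excl 0 = 2 then false else cpcGoA row prefix_ rest

def check_prefix_constraint (n : Int) (row : List Int) (prefix_ : List (List Int)) : Bool :=
  cpcGoA row prefix_ (PySem.List.pyRange 0 n 1)

-- ===== PORT B =====
-- B's inner 'for i in range(n)': bump this column's zero count, then bail out (none =
-- Python's 'return False') on a positive duplicate
def cpcInnerB (row r : List Int) (z : List Int) : List Int → Option (List Int)
  | [] => some z
  | i :: rest =>
    let z' := if PySem.List.pyGetD r i 0 = 0 then z.modify i.toNat (· + 1) else z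
    if 0 < PySem.List.pyGetD row i 0 ∧ PySem.List.pyGetD r i 0 = PySem.List.pyGetD row i 0
    then none
    else cpcInnerB row r z' rest

-- B's outer 'for r in prefix' sweep
def cpcSweepB (row : List Int) (n : Int) (z : List Int) : List (List Int) → Option (List Int)
  | [] => some z
  | r :: rest =>
    match cpcInnerB row r z (PySem.List.pyRange 0 n 1) with
    | none => none
    | some z' => cpcSweepB row n z' rest

def check_prefix_constraint_alt (n : Int) (row : List Int) (prefix_ : List (List Int)) : Bool :=
  match cpcSweepB row n (List.replicate n.toNat 0) prefix_ with
  | none => false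
  | some zeros =>
    !((PySem.List.pyRange 0 n 1).any (fun i =>
      decide (PySem.List.pyGetD row i 0 ≤ 0) && decide (PySem.List.pyGetD zeros i 0 = 2)))

-- ===== PRECONDITION & SPEC =====
-- Pre_ excludes ragged inputs (some indexed list shorter than n): there Python generally
-- raises IndexError — A when building a column, B in its row-major sweep; on a few such
-- inputs A happens to return False at an early column while B raises (see claim.json cites).
def Pre_check_prefix_constraint (n : Int) (row : List Int) (prefix_ : List (List Int)) : Prop :=
  n ≤ (row.length : Int) ∧ ∀ r ∈ prefix_, n ≤ (r.length : Int)
instance (n : Int) (row : List Int) (prefix_ : List (List Int)) : Decidable (Pre_check_prefix_constraint n row prefix_) := by unfold Pre_check_prefix_constraint; infer_instance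

def pvWitness_check_prefix_constraint : Int × List Int × List (List Int) := (2, [1, 2], [[3, 4]])

def Spec_check_prefix_constraint (n : Int) (row : List Int) (prefix_ : List (List Int)) (out : Bool) : Prop := out = check_prefix_constraint_alt n row prefix_
instance (n : Int) (row : List Int) (prefix_ : List (List Int)) (out : Bool) : Decidable (Spec_check_prefix_constraint n row prefix_ out) := by unfold Spec_check_prefix_constraint; infer_instance

-- ===== CLAIM (what is proved, stated in full; the proofs are below) =====
def Claim_equal_check_prefix_constraint : Prop := ∀ (n : Int) (row : List Int) (prefix_ : List (List Int)), Dom_check_prefix_constraint n row prefix_ → Pre_check_prefix_constraint n row prefix_ → Spec_check_prefix_constraint n row prefix_ (check_prefix_constraint n row prefix_)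

-- ===== LEMMAS AND PROOFS =====

-- proof-only name for B's zero-count update of one column
def zstep (r : List Int) (z : List Int) (i : Int) : List Int :=
  if PySem.List.pyGetD r i 0 = 0 then z.modify i.toNat (· + 1) else z

theorem inner_none (row r : List Int) : ∀ (l : List Int) (z : List Int),
    (∃ i ∈ l, 0 < PySem.List.pyGetD row i 0 ∧
      PySem.List.pyGetD r i 0 = PySem.List.pyGetD row i 0) →
    cpcInnerB row r z l = none := by
  intro l
  induction l with
  | nil => rintro z ⟨i, hi, _⟩; cases hi
  | cons i rest ih =>
    rintro z ⟨j, hj, hj1, hj2⟩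
    simp only [cpcInnerB]
    split
    · rfl
    · rename_i hcond
      rcases List.mem_cons.mp hj with h | h
      · exact absurd ⟨h ▸ hj1, h ▸ hj2⟩ hcond
      · exact ih _ ⟨j, h, hj1, hj2⟩

theorem inner_some (row r : List Int) : ∀ (l : List Int) (z : List Int),
    (∀ i ∈ l, ¬(0 < PySem.List.pyGetD row i 0 ∧
      PySem.List.pyGetD r i 0 = PySem.List.pyGetD row i 0)) →
    cpcInnerB row r z l = some (l.foldl (zstep r) z) := by
  intro l
  induction l with
  | nil => intro z _; rfl
  | cons i rest ih =>
    intro z h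
    simp only [cpcInnerB, List.foldl_cons]
    rw [if_neg (h i (List.mem_cons_self ..))]
    exact ih _ (fun x hx => h x (List.mem_cons_of_mem _ hx))

-- indices outside the folded index list keep their zero count
theorem zfold_untouched (r : List Int) (l : List Int) (z : List Int) (j : Nat)
    (h1 : ∀ i ∈ l, 0 ≤ i) (h2 : (j : Int) ∉ l) :
    (l.foldl (zstep r) z)[j]? = z[j]? := by
  induction l generalizing z with
  | nil => rfl
  | cons i rest ih =>
    have hi : 0 ≤ i := h1 i (List.mem_cons_self ..)
    have hji : ¬ ((j : Int) = i) := fun h => h2 (h ▸ List.mem_cons_self ..)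
    have hij : ¬ (i.toNat = j) := by omega
    simp only [List.foldl_cons]
    rw [ih (zstep r z i) (fun x hx => h1 x (List.mem_cons_of_mem _ hx))
        (fun hx => h2 (List.mem_cons_of_mem _ hx))]
    unfold zstep
    split
    · rw [List.getElem?_modify]; cases h : z[j]? <;> simp [hij]
    · rfl

-- the updated list's own entry, read back
theorem zstep_self (r : List Int) (z : List Int) (j : Nat) :
    (zstep r z (j : Int))[j]? =
      z[j]?.map (fun x => x + if PySem.List.pyGetD r (j : Int) 0 = 0 then 1 else 0) := by
  unfold zstep
  split
  · rename_i hv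
    rw [List.getElem?_modify, show ((j : Int)).toNat = j from by omega]
    cases h : z[j]? <;> simp [hv]
  · rename_i hv
    cases h : z[j]? <;> simp [hv]

-- one row's inner fold bumps column j's count exactly when that row has a zero there
theorem zfold_range (n : Int) (r : List Int) (z : List Int) (j : Nat) (hj : (j : Int) < n) :
    ((PySem.List.pyRange 0 n 1).foldl (zstep r) z)[j]? =
      z[j]?.map (fun x => x + if PySem.List.pyGetD r (j : Int) 0 = 0 then 1 else 0) := by
  have hsplit : PySem.List.pyRange 0 n 1 =
      PySem.List.pyRange 0 j 1 ++ (j : Int) :: PySem.List.pyRange ((j : Int) + 1) n 1 := by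
    rw [PySem.List.pyRange_one_append 0 j n (by omega) (by omega)]
    congr 1
    exact PySem.List.pyRange_one_cons (by omega)
  have hpre := zfold_untouched r (PySem.List.pyRange 0 j 1) z j
    (fun i hi => by rw [PySem.List.mem_pyRange_one] at hi; omega)
    (by rw [PySem.List.mem_pyRange_one]; omega)
  rw [hsplit, List.foldl_append, List.foldl_cons,
      zfold_untouched r _ _ j
        (fun i hi => by rw [PySem.List.mem_pyRange_one] at hi; omega)
        (by rw [PySem.List.mem_pyRange_one]; omega),
      zstep_self, hpre]

theorem sweep_none (row : List Int) (n : Int) : ∀ (prefix_ : List (List Int)) (z : List Int),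
    (∃ r ∈ prefix_, ∃ i ∈ PySem.List.pyRange 0 n 1,
      0 < PySem.List.pyGetD row i 0 ∧ PySem.List.pyGetD r i 0 = PySem.List.pyGetD row i 0) →
    cpcSweepB row n z prefix_ = none := by
  intro prefix_
  induction prefix_ with
  | nil => rintro z ⟨r, hr, _⟩; cases hr
  | cons r0 rest ih =>
    rintro z ⟨r, hr, hdup⟩
    by_cases h0 : ∃ i ∈ PySem.List.pyRange 0 n 1,
        0 < PySem.List.pyGetD row i 0 ∧ PySem.List.pyGetD r0 i 0 = PySem.List.pyGetD row i 0
    · simp only [cpcSweepB, inner_none row r0 _ z h0]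
    · have hne : r ∈ rest := by
        rcases List.mem_cons.mp hr with h | h
        · exact absurd (h ▸ hdup) h0
        · exact h
      simp only [cpcSweepB, inner_some row r0 _ z (by
        intro i hi hc
        exact h0 ⟨i, hi, hc⟩)]
      exact ih _ ⟨r, hne, hdup⟩

theorem sweep_some (row : List Int) (n : Int) : ∀ (prefix_ : List (List Int)) (z : List Int),
    (∀ r ∈ prefix_, ∀ i ∈ PySem.List.pyRange 0 n 1,
      ¬(0 < PySem.List.pyGetD row i 0 ∧ PySem.List.pyGetD r i 0 = PySem.List.pyGetD row i 0)) →
    cpcSweepB row n z prefix_ =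
      some (prefix_.foldl (fun z r => (PySem.List.pyRange 0 n 1).foldl (zstep r) z) z) := by
  intro prefix_
  induction prefix_ with
  | nil => intro z _; rfl
  | cons r0 rest ih =>
    intro z h
    simp only [cpcSweepB, List.foldl_cons,
      inner_some row r0 _ z (h r0 (List.mem_cons_self ..))]
    exact ih _ (fun r hr => h r (List.mem_cons_of_mem _ hr))

-- the accumulated fold holds, per column j, the count of zeros in that column of prefix
theorem fold_zeros (n : Int) (prefix_ : List (List Int)) (z : List Int) (j : Nat)
    (hj : (j : Int) < n) :
    (prefix_.foldl (fun z r => (PySem.List.pyRange 0 n 1).foldl (zstep r) z) z)[j]? =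
      z[j]?.map (fun x =>
        x + ((prefix_.map (fun r => PySem.List.pyGetD r (j : Int) 0)).count 0 : Int)) := by
  induction prefix_ generalizing z with
  | nil => cases h : z[j]? <;> simp [h]
  | cons r rest ih =>
    simp only [List.foldl_cons]
    rw [ih, zfold_range n r z j hj]
    cases h : z[j]? with
    | none => simp
    | some x =>
      simp only [Option.map_some, List.map_cons, List.count_cons]
      by_cases hv : PySem.List.pyGetD r ((j : Int)) 0 = 0 <;> simp [hv] <;> omega

-- A returns False as soon as some column violates a constraint
theorem goA_false (row : List Int) (prefix_ : List (List Int)) : ∀ (l : List Int),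
    (∃ i ∈ l, 0 < PySem.List.pyGetD row i 0 ∧
      (prefix_.map (fun r => PySem.List.pyGetD r i 0)).contains (PySem.List.pyGetD row i 0)) →
    cpcGoA row prefix_ l = false := by
  intro l
  induction l with
  | nil => rintro ⟨i, hi, _⟩; cases hi
  | cons i rest ih =>
    rintro ⟨j, hj, hj1, hj2⟩
    rcases List.mem_cons.mp hj with h | h
    · subst h
      simp only [cpcGoA]
      rw [if_pos hj1, if_pos hj2]
    · simp only [cpcGoA]
      split_ifs <;> first | rfl | exact ih ⟨j, h, hj1, hj2⟩

-- with no positive duplicate anywhere, A reduces to the zero-count check alone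
theorem goA_nodup (row : List Int) (prefix_ : List (List Int)) : ∀ (l : List Int),
    (∀ i ∈ l, ¬(0 < PySem.List.pyGetD row i 0 ∧
      (prefix_.map (fun r => PySem.List.pyGetD r i 0)).contains (PySem.List.pyGetD row i 0))) →
    cpcGoA row prefix_ l = !(l.any (fun i =>
      decide (PySem.List.pyGetD row i 0 ≤ 0) &&
      decide (PySem.List.count (prefix_.map (fun r => PySem.List.pyGetD r i 0)) 0 = 2))) := by
  intro l
  induction l with
  | nil => intro _; rfl
  | cons i rest ih =>
    intro h
    simp only [cpcGoA, List.any_cons]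
    by_cases hv : 0 < PySem.List.pyGetD row i 0
    · have hnc : ¬ (prefix_.map (fun r => PySem.List.pyGetD r i 0)).contains
          (PySem.List.pyGetD row i 0) = true := fun hc =>
        h i (List.mem_cons_self ..) ⟨hv, hc⟩
      rw [if_pos hv, if_neg hnc]
      have : decide (PySem.List.pyGetD row i 0 ≤ 0) = false := by
        simp; omega
      rw [this, ih (fun x hx => h x (List.mem_cons_of_mem _ hx))]
      simp
    · rw [if_neg hv]
      have hle : decide (PySem.List.pyGetD row i 0 ≤ 0) = true := by simp; omega
      by_cases hc : PySem.List.count (prefix_.map (fun r => PySem.List.pyGetD r i 0)) 0 = 2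
      · rw [if_pos hc, hle, decide_eq_true hc]
        simp
      · rw [if_neg hc, hle, ih (fun x hx => h x (List.mem_cons_of_mem _ hx)),
            decide_eq_false hc]
        simp

-- ===== VERDICT (by name: the statement is the Claim_ definition above) =====
theorem check_prefix_constraint_spec : Claim_equal_check_prefix_constraint := by
  intro n row prefix_ _ _
  unfold Spec_check_prefix_constraint check_prefix_constraint check_prefix_constraint_alt
  by_cases hdup : ∃ r ∈ prefix_, ∃ i ∈ PySem.List.pyRange 0 n 1,
      0 < PySem.List.pyGetD row i 0 ∧ PySem.List.pyGetD r i 0 = PySem.List.pyGetD row i 0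
  · rw [sweep_none row n prefix_ _ hdup]
    obtain ⟨r, hr, i, hi, h1, h2⟩ := hdup
    exact goA_false row prefix_ _ ⟨i, hi, h1, by
      simp only [List.contains_iff_mem]
      exact h2 ▸ List.mem_map_of_mem hr⟩
  · push_neg at hdup
    rw [sweep_some row n prefix_ _ (by
      intro r hr i hi hc
      exact (hdup r hr i hi hc.1) hc.2)]
    rw [goA_nodup row prefix_ _ (by
      intro i hi hc
      rcases hc with ⟨h1, h2⟩
      simp only [List.contains_iff_mem, List.mem_map] at h2
      obtain ⟨r, hr, hre⟩ := h2
      exact (hdup r hr i hi h1) hre)]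
    congr 1
    apply PySem.List.any_congr_mem
    intro i hi
    rw [PySem.List.mem_pyRange_one] at hi
    congr 1
    have hjn : ((i.toNat : Nat) : Int) = i := by omega
    have hfz := fold_zeros n prefix_ (List.replicate n.toNat 0) i.toNat (by omega)
    have hinit : (List.replicate n.toNat (0 : Int))[i.toNat]? = some 0 := by
      rw [List.getElem?_eq_getElem (by simp; omega)]; simp
    rw [hinit] at hfz
    have hget : PySem.List.pyGetD
        (prefix_.foldl (fun z r => (PySem.List.pyRange 0 n 1).foldl (zstep r) z)
          (List.replicate n.toNat 0)) i 0
        = ((prefix_.map (fun r => PySem.List.pyGetD r i 0)).count 0 : Int) := by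
      conv_lhs => rw [← hjn]
      rw [PySem.List.pyGetD_natCast, List.getD_eq_getElem?_getD, hfz]
      simp [hjn]
    rw [hget, PySem.List.count_eq]
    exact decide_eq_decide.mpr (by omega)
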